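-- pv_equiv track=rewrite | github.com/calvin03lan/Tag-Checking-Automation | core/tag_analyzer.py | keyword_statuses
-- ===== SOURCE A (Python) =====
-- from typing import Dict, List, Tuple
--
-- def keyword_statuses(
--     captured_urls: List[str],
--     keywords: List[str],
-- ) -> Dict[str, bool]:
--     """
--     Return a per-keyword hit map.
--
--     Returns:
--         {keyword_text: True/False}
--         True  – at least one captured URL contained this keyword
--         False – no captured URL contained this keyword
--     """
--     return {
--         kw: any(kw in url for url in captured_urls)
--         for kw in keywords
--         if kw
--     }
-- ===== SOURCE B (Python) =====
-- def keyword_statuses(captured_urls, keywords):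
--     # One pass over the URLs, pruning already-matched keywords and
--     # stopping early once every keyword has been found.
--     status = {}
--     for kw in keywords:
--         if kw and kw not in status:
--             status[kw] = False
--     pending = list(status)
--     for url in captured_urls:
--         if not pending:
--             break
--         still = []
--         for kw in pending:
--             if kw in url:
--                 status[kw] = True
--             else:
--                 still.append(kw)
--         pending = still
--     return status
-- ===== Notes on version B (the rewrite author's own statement) =====
-- stated objective: alternative
-- what changed: B replaces the per-keyword scan of all URLs with a single pass over the URLs that maintains a shrinking pending list of unmatched keywords and stops early once all are matched.
import Mathlib
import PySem

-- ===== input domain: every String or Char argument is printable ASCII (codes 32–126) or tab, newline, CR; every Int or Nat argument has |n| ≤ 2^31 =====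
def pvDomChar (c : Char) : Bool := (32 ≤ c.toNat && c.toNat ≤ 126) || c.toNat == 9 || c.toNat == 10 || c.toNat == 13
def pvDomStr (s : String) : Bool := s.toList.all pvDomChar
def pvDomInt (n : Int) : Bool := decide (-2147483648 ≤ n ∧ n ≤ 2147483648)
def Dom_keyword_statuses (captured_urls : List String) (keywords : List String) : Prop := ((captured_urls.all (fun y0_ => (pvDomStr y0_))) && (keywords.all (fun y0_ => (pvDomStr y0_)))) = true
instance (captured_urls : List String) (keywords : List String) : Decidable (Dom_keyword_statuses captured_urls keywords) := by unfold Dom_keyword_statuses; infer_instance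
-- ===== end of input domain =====

-- B scans the URLs once with a shrinking pending list of unmatched keywords and an early break; A scans all URLs per keyword.

-- ===== PORT A =====
-- dict comprehension: {kw: any(kw in url for url in captured_urls) for kw in keywords if kw}
def keyword_statuses (captured_urls : List String) (keywords : List String) : List (String × Bool) :=
  (keywords.foldl
    (fun d kw =>
      if kw ≠ "" then d.insert kw (captured_urls.any (fun url => PySem.Str.isIn kw url)) else d)
    (PySem.Dict.empty : PySem.Dict String Bool)).items

-- ===== PORT B =====
-- phase 1: status = {} ; for kw in keywords: if kw and kw not in status: status[kw] = False
def ksAltInit (keywords : List String) : PySem.Dict String Bool :=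
  keywords.foldl
    (fun d kw => if kw ≠ "" ∧ d.contains kw = false then d.insert kw false else d)
    PySem.Dict.empty

-- phase 2: for url in captured_urls: if not pending: break; inner loop over pending
def ksAltLoop (urls : List String) (status : PySem.Dict String Bool) (pending : List String) :
    PySem.Dict String Bool :=
  match urls with
  | [] => status
  | url :: rest =>
    if pending = [] then status
    else
      let r := pending.foldl
        (fun (st : PySem.Dict String Bool × List String) kw =>
          if PySem.Str.isIn kw url then (st.1.insert kw true, st.2) else (st.1, st.2 ++ [kw]))
        (status, [])
      ksAltLoop rest r.1 r.2

def keyword_statuses_alt (captured_urls : List String) (keywords : List String) : List (String × Bool) :=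
  let status := ksAltInit keywords
  (ksAltLoop captured_urls status status.keys).items

-- ===== PRECONDITION & SPEC =====
def Spec_keyword_statuses (captured_urls : List String) (keywords : List String) (out : List (String × Bool)) : Prop := out = keyword_statuses_alt captured_urls keywords
instance (captured_urls : List String) (keywords : List String) (out : List (String × Bool)) : Decidable (Spec_keyword_statuses captured_urls keywords out) := by unfold Spec_keyword_statuses; infer_instance

-- ===== CLAIM (what is proved, stated in full; the proofs are below) =====
def Claim_equal_keyword_statuses : Prop := ∀ (captured_urls : List String) (keywords : List String), Dom_keyword_statuses captured_urls keywords → Spec_keyword_statuses captured_urls keywords (keyword_statuses captured_urls keywords)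

-- ===== LEMMAS AND PROOFS =====

-- key list both folds build: nonempty keywords, first occurrences, in order
def ksKeys (ds : List String) (ks : List String) : List String :=
  ks.foldl (fun a k => if k ≠ "" then (if k ∈ a then a else a ++ [k]) else a) ds

-- anyC urls kw = any(kw in url for url in urls)
def anyC (urls : List String) (kw : String) : Bool :=
  urls.any (fun url => PySem.Str.isIn kw url)

theorem ksKeys_cons (ds k ks) :
    ksKeys ds (k :: ks) = ksKeys (if k ≠ "" then (if k ∈ ds then ds else ds ++ [k]) else ds) ks := rfl

theorem keys_of_items {d : PySem.Dict String Bool} {ds : List String} {f : String → Bool}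
    (h : d.items = ds.map (fun k => (k, f k))) : d.keys = ds := by
  simp [PySem.Dict.keys, h, List.map_map, Function.comp_def]

theorem contains_of_items {d : PySem.Dict String Bool} {ds : List String} {f : String → Bool}
    (h : d.items = ds.map (fun k => (k, f k))) (k : String) :
    d.contains k = decide (k ∈ ds) := by
  rw [PySem.Dict.contains_eq_decide_mem_keys, keys_of_items h]

theorem items_insert_same {d : PySem.Dict String Bool} {ds : List String} {f : String → Bool}
    (h : d.items = ds.map (fun k => (k, f k))) (k : String) :
    (d.insert k (f k)).items = (if k ∈ ds then ds else ds ++ [k]).map (fun k' => (k', f k')) := by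
  by_cases hm : k ∈ ds
  · have hc : d.contains k = true := by rw [contains_of_items h]; simpa
    rw [PySem.Dict.items_insert_of_contains _ _ hc, h, List.map_map, if_pos hm]
    apply List.map_congr_left
    intro x hx
    by_cases hxk : x = k
    · subst hxk; simp
    · simp [hxk]
  · have hc : d.contains k = false := by rw [contains_of_items h]; simpa
    rw [PySem.Dict.items_insert_of_not_contains _ _ hc, h, if_neg hm, List.map_append]
    simp

theorem ksA_items (f : String → Bool) :
    ∀ (ks : List String) (ds : List String) (d : PySem.Dict String Bool),
    d.items = ds.map (fun k => (k, f k)) →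
    ((ks.foldl (fun d kw => if kw ≠ "" then d.insert kw (f kw) else d) d).items
      = (ksKeys ds ks).map (fun k => (k, f k))) := by
  intro ks
  induction ks with
  | nil => intro ds d h; simpa [ksKeys] using h
  | cons k ks ih =>
    intro ds d h
    rw [List.foldl_cons, ksKeys_cons]
    by_cases hk : k = ""
    · subst hk
      simp only [ne_eq, not_true_eq_false, if_false]
      exact ih ds d h
    · simp only [ne_eq, hk, not_false_eq_true, if_true]
      exact ih _ _ (items_insert_same h k)

theorem items_insert_mem {d : PySem.Dict String Bool} {ds : List String} {g : String → Bool}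
    (h : d.items = ds.map (fun k => (k, g k))) {k : String} (hm : k ∈ ds) (v : Bool) :
    (d.insert k v).items = ds.map (fun k' => (k', if k' = k then v else g k')) := by
  have hc : d.contains k = true := by rw [contains_of_items h]; simpa
  rw [PySem.Dict.items_insert_of_contains _ _ hc, h, List.map_map]
  apply List.map_congr_left
  intro x hx
  by_cases hxk : x = k
  · subst hxk; simp
  · simp [hxk]

theorem ksB_init :
    ∀ (ks : List String) (ds : List String) (d : PySem.Dict String Bool),
    d.items = ds.map (fun k => (k, false)) →
    ((ks.foldl (fun d kw => if kw ≠ "" ∧ d.contains kw = false then d.insert kw false else d) d).items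
      = (ksKeys ds ks).map (fun k => (k, false))) := by
  intro ks
  induction ks with
  | nil => intro ds d h; simpa [ksKeys] using h
  | cons k ks ih =>
    intro ds d h
    rw [List.foldl_cons, ksKeys_cons]
    have hc : d.contains k = decide (k ∈ ds) := contains_of_items (f := fun _ => false) h k
    by_cases hk : k = ""
    · subst hk
      simp only [ne_eq, not_true_eq_false, false_and, if_false]
      exact ih ds d h
    · by_cases hm : k ∈ ds
      · rw [if_neg (by simp [hc, hm]), if_pos hk, if_pos hm]
        exact ih ds d h
      · rw [if_pos ⟨hk, by simp [hc, hm]⟩, if_pos hk, if_neg hm]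
        have hi := items_insert_same (f := fun _ => false) h k
        rw [if_neg hm] at hi
        exact ih _ _ hi

theorem ksInner (url : String) (D : List String) :
    ∀ (pend : List String) (g : String → Bool) (status : PySem.Dict String Bool) (acc : List String),
    status.items = D.map (fun k => (k, g k)) →
    (∀ k ∈ pend, k ∈ D) →
    ((pend.foldl
        (fun (st : PySem.Dict String Bool × List String) kw =>
          if PySem.Str.isIn kw url then (st.1.insert kw true, st.2) else (st.1, st.2 ++ [kw]))
        (status, acc)).1.items
        = D.map (fun k => (k, if k ∈ pend ∧ PySem.Str.isIn k url = true then true else g k)))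
    ∧ ((pend.foldl
        (fun (st : PySem.Dict String Bool × List String) kw =>
          if PySem.Str.isIn kw url then (st.1.insert kw true, st.2) else (st.1, st.2 ++ [kw]))
        (status, acc)).2
        = acc ++ pend.filter (fun k => !(PySem.Str.isIn k url))) := by
  intro pend
  induction pend with
  | nil =>
    intro g status acc h _
    constructor
    · simpa using h
    · simp
  | cons kw rest ih =>
    intro g status acc h hsub
    rw [List.foldl_cons]
    by_cases hin : PySem.Str.isIn kw url = true
    · rw [if_pos hin]
      have hkwD : kw ∈ D := hsub kw (by simp)
      have h1 := items_insert_mem h hkwD true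
      obtain ⟨i1, i2⟩ := ih (fun k' => if k' = kw then true else g k') (status.insert kw true) acc h1
        (fun k hk => hsub k (by simp [hk]))
      refine ⟨?_, ?_⟩
      · rw [i1]
        apply List.map_congr_left
        intro x hx
        by_cases hxk : x = kw
        · have hinC : PySem.Chars.isIn kw.toList url.toList = true := by simpa using hin
          simp [hxk, hinC]
        · simp [List.mem_cons, hxk]
      · rw [i2, List.filter_cons, hin]
        simp
    · rw [if_neg hin]
      have hin' : PySem.Str.isIn kw url = false := by simpa using hin
      obtain ⟨i1, i2⟩ := ih g status (acc ++ [kw]) h (fun k hk => hsub k (by simp [hk]))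
      refine ⟨?_, ?_⟩
      · rw [i1]
        apply List.map_congr_left
        intro x hx
        by_cases hxk : x = kw
        · have hinC : PySem.Chars.isIn kw.toList url.toList = false := by simpa using hin'
          simp [hxk, hinC]
        · simp [List.mem_cons, hxk]
      · rw [i2, List.filter_cons, hin']
        simp

theorem anyC_append (a b : List String) (k : String) : anyC (a ++ b) k = (anyC a k || anyC b k) := by
  simp [anyC]

theorem anyC_singleton (url k : String) : anyC [url] k = PySem.Str.isIn k url := by
  simp [anyC]

theorem ksLoop_items (D : List String) :
    ∀ (urls processed : List String) (status : PySem.Dict String Bool) (pending : List String),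
    status.items = D.map (fun k => (k, anyC processed k)) →
    pending = D.filter (fun k => !(anyC processed k)) →
    (ksAltLoop urls status pending).items = D.map (fun k => (k, anyC (processed ++ urls) k)) := by
  intro urls
  induction urls with
  | nil =>
    intro processed status pending h _
    simpa [ksAltLoop] using h
  | cons url rest ih =>
    intro processed status pending h hpend
    simp only [ksAltLoop]
    by_cases hp : pending = []
    · rw [if_pos hp, h]
      apply List.map_congr_left
      intro x hx
      have hall : ∀ k ∈ D, ¬ (!(anyC processed k)) = true := by
        rw [← List.filter_eq_nil_iff, ← hpend, hp]
      have hx' : anyC processed x = true := by simpa using hall x hx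
      simp [anyC_append, hx']
    · rw [if_neg hp]
      have hsub : ∀ k ∈ pending, k ∈ D := by
        intro k hk
        rw [hpend] at hk
        exact (List.mem_filter.mp hk).1
      obtain ⟨i1, i2⟩ := ksInner url D pending (anyC processed) status [] h hsub
      have h1 : (pending.foldl
          (fun (st : PySem.Dict String Bool × List String) kw =>
            if PySem.Str.isIn kw url then (st.1.insert kw true, st.2) else (st.1, st.2 ++ [kw]))
          (status, [])).1.items = D.map (fun k => (k, anyC (processed ++ [url]) k)) := by
        rw [i1]
        apply List.map_congr_left
        intro x hx
        have hmem : x ∈ pending ↔ (x ∈ D ∧ anyC processed x = false) := by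
          rw [hpend, List.mem_filter]
          simp
        cases hA : anyC processed x with
        | true =>
          have hnp : x ∉ pending := by rw [hmem]; simp [hA]
          rw [if_neg (fun hc => hnp hc.1), anyC_append, hA]
          simp
        | false =>
          have hip : x ∈ pending := hmem.mpr ⟨hx, hA⟩
          rw [anyC_append, anyC_singleton]
          cases hI : PySem.Str.isIn x url with
          | true => rw [if_pos ⟨hip, rfl⟩]; simp
          | false => rw [if_neg (by simp), hA]; simp
      have h2 : (pending.foldl
          (fun (st : PySem.Dict String Bool × List String) kw =>
            if PySem.Str.isIn kw url then (st.1.insert kw true, st.2) else (st.1, st.2 ++ [kw]))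
          (status, [])).2 = D.filter (fun k => !(anyC (processed ++ [url]) k)) := by
        rw [i2, hpend, List.nil_append, List.filter_filter]
        apply List.filter_congr
        intro x hx
        rw [anyC_append, anyC_singleton, Bool.not_or]
        exact Bool.and_comm _ _
      have := ih (processed ++ [url]) _ _ h1 h2
      simpa using this

theorem keyword_statuses_spec : Claim_equal_keyword_statuses := by
  intro captured_urls keywords _
  unfold Spec_keyword_statuses keyword_statuses keyword_statuses_alt
  have hA := ksA_items (fun kw => captured_urls.any (fun url => PySem.Str.isIn kw url))
    keywords [] PySem.Dict.empty (by rfl)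
  have hI := ksB_init keywords [] PySem.Dict.empty (by rfl)
  have hkeys : (ksAltInit keywords).keys = ksKeys [] keywords :=
    keys_of_items (f := fun _ => false) hI
  have hL := ksLoop_items (ksKeys [] keywords) captured_urls [] (ksAltInit keywords)
    ((ksAltInit keywords).keys)
    (by simpa [anyC] using hI)
    (by rw [hkeys]; symm; simp [anyC])
  rw [hA]
  rw [show (ksAltLoop captured_urls (ksAltInit keywords) (ksAltInit keywords).keys).items
      = (ksKeys [] keywords).map (fun k => (k, anyC ([] ++ captured_urls) k)) from hL]
  simp [anyC]
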